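-- pv_equiv track=rewrite | github.com/japeltom/ternary-rich-words-verification | conditions.py | is_poor
-- ===== SOURCE A (Python) =====
-- def non_prefix_occurrences(u, w):
--     if len(u) == 0:
--         return list(range(1, len(w) + 1))
--     occurrences = []
--     pos = 1
--     while pos > 0 and pos < len(w):
--         pos = w.find(u, pos)
--         if pos != -1:
--             occurrences.append(pos)
--         pos += 1
--
--     return occurrences
--
-- def is_poor(w):
--     is_palindrome = lambda w: w == w[::-1]
--     for l in range(len(w) + 1):
--         pref = w[:l]
--         if not is_palindrome(pref): continue
--         if not pref.count("2") % 2 == 0: continue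
--         found = False
--         for pos in non_prefix_occurrences(pref, w):
--             x = w[:pos]
--             if x.count("2") % 2 == 0:
--                 found = True
--                 break
--
--         if not found:
--             return False
--
--     return True
-- ===== SOURCE B (Python) =====
-- def is_poor(w):
--     # evens = positions p in 1..n whose prefix w[:p] has an even number of '2'
--     evens = []
--     parity = 0
--     i = 0
--     for c in w:
--         i += 1
--         parity = (parity + (c == '2')) % 2
--         if parity == 0:
--             evens.append(i)
--     if not evens:
--         return False
--     # m = largest l in evens with w[:l] a palindrome (0 if none); checking the
--     # longest such prefix subsumes all shorter ones, since any occurrence of it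
--     # at an even-parity position also yields occurrences of all its prefixes.
--     m = 0
--     for l in evens:
--         p = w[:l]
--         if p == p[::-1]:
--             m = l
--     if m == 0:
--         return True
--     pref = w[:m]
--     return any(w[p:p + m] == pref for p in evens)
-- ===== Notes on version B (the rewrite author's own statement) =====
-- stated objective: faster
-- what changed: A re-tests every prefix as a palindrome, recounts '2' per prefix and per candidate position, and runs a find-based occurrence scan for each palindromic prefix; B computes all even-parity prefix positions in one pass, then only needs the longest palindromic even-parity prefix (occurrences of shorter ones follow from occurrences of it), checked by a single scan over the even-parity positions with O(1) parity lookups.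
import Mathlib
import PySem

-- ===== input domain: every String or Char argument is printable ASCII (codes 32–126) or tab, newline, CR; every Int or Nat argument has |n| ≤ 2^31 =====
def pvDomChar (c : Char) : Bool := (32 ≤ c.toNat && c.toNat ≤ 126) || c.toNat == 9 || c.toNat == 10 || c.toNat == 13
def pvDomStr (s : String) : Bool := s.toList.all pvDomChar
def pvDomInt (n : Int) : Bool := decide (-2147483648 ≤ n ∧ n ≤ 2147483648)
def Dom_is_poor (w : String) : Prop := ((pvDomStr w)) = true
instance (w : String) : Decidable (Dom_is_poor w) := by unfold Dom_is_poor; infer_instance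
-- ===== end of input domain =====

-- B replaces A's per-prefix occurrence search (with a fresh '2'-count at every
-- candidate position) by one parity pass and a single occurrence scan for the
-- longest palindromic even-parity prefix; measured faster on adversarial inputs.

-- ===== PORT A =====

-- the 'while pos > 0 and pos < len(w)' loop of non_prefix_occurrences; when
-- w.find(u, pos) returns -1, pos becomes 0 and the loop condition fails, so the
-- accumulated occurrences are returned directly
def occLoop (u wcs : List Char) (pos : Nat) (acc : List Int) : List Int :=
  if h : 0 < pos ∧ pos < wcs.length then
    let p := PySem.Chars.findFrom wcs u (pos : Int) none
    if hp : p = -1 then acc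
    else occLoop u wcs (p.toNat + 1) (acc ++ [p])
  else acc
termination_by wcs.length - pos
decreasing_by
  have hs := PySem.Chars.findFrom_natCast_spec wcs u pos (le_of_lt h.2) hp
  omega

def non_prefix_occurrences (u wcs : List Char) : List Int :=
  if u.length = 0 then PySem.List.pyRange 1 ((wcs.length : Int) + 1) 1
  else occLoop u wcs 1 []

-- inner 'for pos in non_prefix_occurrences(...)' loop with break, as recursion
def foundLoop (wcs : List Char) : List Int → Bool
  | [] => false
  | pos :: rest =>
    let x := PySem.List.slice wcs none (some pos)
    if PySem.Chars.count x ['2'] % 2 = 0 then true else foundLoop wcs rest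

-- outer 'for l in range(len(w) + 1)' loop with early 'return False'
def isPoorLoop (wcs : List Char) : List Int → Bool
  | [] => true
  | l :: rest =>
    let pref := PySem.List.slice wcs none (some l)
    if ¬ (pref = pref.reverse) then isPoorLoop wcs rest          -- pref[::-1]
    else if ¬ (PySem.Chars.count pref ['2'] % 2 = 0) then isPoorLoop wcs rest
    else if foundLoop wcs (non_prefix_occurrences pref wcs) then isPoorLoop wcs rest
    else false

def is_poor (w : String) : Bool :=
  isPoorLoop w.toList (PySem.List.pyRange 0 ((w.toList.length : Int) + 1) 1)

-- ===== PORT B =====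

-- first loop of B: state (i, parity, evens)
def evensLoop (cs : List Char) : List Int :=
  (cs.foldl (fun (st : Int × Int × List Int) c =>
    let i := st.1 + 1
    let parity := (st.2.1 + (if c = '2' then 1 else 0)) % 2
    (i, parity, if parity = 0 then st.2.2 ++ [i] else st.2.2)) (0, 0, [])).2.2

-- second loop of B: m = last l in evens whose prefix w[:l] is a palindrome
def maxPalLoop (cs : List Char) (evens : List Int) : Int :=
  evens.foldl (fun m l =>
    let p := PySem.List.slice cs none (some l)
    if p = p.reverse then l else m) 0                            -- p[::-1]

def is_poor_alt (w : String) : Bool :=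
  let cs := w.toList
  let evens := evensLoop cs
  if evens = [] then false
  else
    let m := maxPalLoop cs evens
    if m = 0 then true
    else
      let pref := PySem.List.slice cs none (some m)
      evens.any (fun p => PySem.List.slice cs (some p) (some (p + m)) = pref)

-- ===== PRECONDITION & SPEC =====
def Spec_is_poor (w : String) (out : Bool) : Prop := out = is_poor_alt w
instance (w : String) (out : Bool) : Decidable (Spec_is_poor w out) := by unfold Spec_is_poor; infer_instance

-- ===== CLAIM (what is proved, stated in full; the proofs are below) =====
def Claim_equal_is_poor : Prop := ∀ (w : String), Dom_is_poor w → Spec_is_poor w (is_poor w)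

-- ===== LEMMAS AND PROOFS =====

-- parity of the number of '2' in the length-k prefix
def par2 (cs : List Char) (k : Nat) : Nat := ((cs.take k).count '2') % 2
-- the length-k prefix is a palindrome
def isPal (cs : List Char) (k : Nat) : Prop := cs.take k = (cs.take k).reverse
-- the length-k prefix occurs at position p
def matchAt (cs : List Char) (p k : Nat) : Prop := (cs.drop p).take k = cs.take k

-- the common mathematical reading of both programs
def PoorSpec (cs : List Char) : Prop :=
  ∀ l : Nat, l ≤ cs.length → isPal cs l → par2 cs l = 0 →
    ∃ p : Nat, 1 ≤ p ∧ p ≤ cs.length ∧ matchAt cs p l ∧ par2 cs p = 0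

-- ---------- A-side ----------

lemma count_go_single (l : List Char) : ∀ (fuel acc : Nat), l.length ≤ fuel →
    PySem.Chars.count.go ['2'] fuel l acc = acc + l.count '2' := by
  induction l with
  | nil => intro fuel acc _; cases fuel <;> simp [PySem.Chars.count.go]
  | cons h t ih =>
    intro fuel acc hle
    cases fuel with
    | zero => simp at hle
    | succ f =>
      have hlf : t.length ≤ f := by simp at hle; omega
      have heq : PySem.Chars.count.go ['2'] (f+1) (h :: t) acc
          = if (['2'] : List Char).isPrefixOf (h :: t)
            then PySem.Chars.count.go ['2'] f ((h :: t).drop (['2'] : List Char).length) (acc+1)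
            else PySem.Chars.count.go ['2'] f t acc := rfl
      rw [heq]
      by_cases hh : h = '2'
      · subst hh
        simp only [List.isPrefixOf, beq_self_eq_true, Bool.true_and,
          if_true, List.length_cons, List.length_nil, List.drop_succ_cons, List.drop_zero]
        rw [ih f (acc + 1) hlf]
        simp
        omega
      · have hbf : (('2' : Char) == h) = false := beq_eq_false_iff_ne.mpr (Ne.symm hh)
        have hbf2 : ((h : Char) == '2') = false := beq_eq_false_iff_ne.mpr hh
        simp only [List.isPrefixOf, hbf, Bool.false_and, Bool.false_eq_true, if_false]
        rw [ih f acc hlf]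
        simp [List.count_cons, hbf2]

lemma count2_eq (xs : List Char) : PySem.Chars.count xs ['2'] = xs.count '2' := by
  have := count_go_single xs xs.length 0 le_rfl
  simp only [PySem.Chars.count, List.isEmpty_cons, if_false, Bool.false_eq_true]
  omega

-- a prefix of a drop is an infix
lemma prefix_drop_infix (u cs : List Char) (k : Nat) (h : u <+: cs.drop k) : u <:+: cs :=
  h.isInfix.trans (List.drop_suffix k cs).isInfix

lemma occLoop_stop (u wcs : List Char) (pos : Nat) (acc : List Int)
    (h : ¬ (0 < pos ∧ pos < wcs.length)) : occLoop u wcs pos acc = acc := by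
  rw [occLoop, dif_neg h]

lemma occLoop_none (u wcs : List Char) (pos : Nat) (acc : List Int)
    (h : 0 < pos ∧ pos < wcs.length)
    (hp : PySem.Chars.findFrom wcs u (pos : Int) none = -1) :
    occLoop u wcs pos acc = acc := by
  rw [occLoop, dif_pos h]
  simp [hp]

lemma occLoop_found (u wcs : List Char) (pos : Nat) (acc : List Int)
    (h : 0 < pos ∧ pos < wcs.length)
    (hp : ¬ PySem.Chars.findFrom wcs u (pos : Int) none = -1) :
    occLoop u wcs pos acc =
      occLoop u wcs ((PySem.Chars.findFrom wcs u (pos : Int) none).toNat + 1)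
        (acc ++ [PySem.Chars.findFrom wcs u (pos : Int) none]) := by
  rw [occLoop, dif_pos h]
  simp [hp]

lemma occLoop_mem (u wcs : List Char) (hu : u ≠ []) (q : Int) :
    ∀ (pos : Nat) (acc : List Int), 0 < pos →
    (q ∈ occLoop u wcs pos acc ↔
      q ∈ acc ∨ ∃ qn : Nat, q = (qn : Int) ∧ pos ≤ qn ∧ u <+: wcs.drop qn) := by
  suffices H : ∀ (k pos : Nat) (acc : List Int), wcs.length - pos ≤ k → 0 < pos →
      (q ∈ occLoop u wcs pos acc ↔
        q ∈ acc ∨ ∃ qn : Nat, q = (qn : Int) ∧ pos ≤ qn ∧ u <+: wcs.drop qn) by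
    exact fun pos acc => H (wcs.length - pos) pos acc le_rfl
  intro k
  induction k with
  | zero =>
    intro pos acc hk hpos
    rw [occLoop_stop u wcs pos acc (by omega)]
    constructor
    · exact Or.inl
    · rintro (hq | ⟨qn, rfl, hle, hpre⟩)
      · exact hq
      · exfalso
        rw [List.drop_eq_nil_of_le (by omega)] at hpre
        exact hu (List.prefix_nil.mp hpre)
  | succ k ih =>
    intro pos acc hk hpos
    by_cases hcond : pos < wcs.length
    · have h : 0 < pos ∧ pos < wcs.length := ⟨hpos, hcond⟩
      by_cases hp : PySem.Chars.findFrom wcs u (pos : Int) none = -1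
      · rw [occLoop_none u wcs pos acc h hp]
        have hnone := (PySem.Chars.findFrom_natCast_eq_neg_one_iff wcs u pos (le_of_lt h.2)).mp hp
        constructor
        · exact Or.inl
        · rintro (hq | ⟨qn, rfl, hle, hpre⟩)
          · exact hq
          · exfalso
            apply hnone
            have hdd : (wcs.drop pos).drop (qn - pos) = wcs.drop qn := by
              rw [List.drop_drop]; congr 1; omega
            exact prefix_drop_infix u (wcs.drop pos) (qn - pos) (hdd ▸ hpre)
      · have hs := PySem.Chars.findFrom_natCast_spec wcs u pos (le_of_lt h.2) hp
        set f := PySem.Chars.findFrom wcs u (pos : Int) none with hf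
        have hf0 : (0 : Int) ≤ f := le_trans (by exact_mod_cast Nat.zero_le pos) hs.1
        have hfn : ((f.toNat : Int)) = f := Int.toNat_of_nonneg hf0
        have hposf : pos ≤ f.toNat := by omega
        rw [occLoop_found u wcs pos acc h hp]
        rw [ih (f.toNat + 1) (acc ++ [f]) (by omega) (by omega)]
        constructor
        · rintro (hq | ⟨qn, rfl, hle, hpre⟩)
          · rw [List.mem_append] at hq
            rcases hq with hq | hq
            · exact Or.inl hq
            · simp only [List.mem_singleton] at hq
              subst hq
              exact Or.inr ⟨f.toNat, hfn.symm, hposf, hs.2.1⟩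
          · exact Or.inr ⟨qn, rfl, by omega, hpre⟩
        · rintro (hq | ⟨qn, rfl, hle, hpre⟩)
          · exact Or.inl (List.mem_append_left _ hq)
          · by_cases hqf : qn < f.toNat
            · exact absurd hpre (hs.2.2 qn hle hqf)
            · by_cases hqe : qn = f.toNat
              · subst hqe
                exact Or.inl (List.mem_append_right _ (by simp [hfn]))
              · exact Or.inr ⟨qn, rfl, by omega, hpre⟩
    · rw [occLoop_stop u wcs pos acc (by omega)]
      constructor
      · exact Or.inl
      · rintro (hq | ⟨qn, rfl, hle, hpre⟩)
        · exact hq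
        · exfalso
          rw [List.drop_eq_nil_of_le (by omega)] at hpre
          exact hu (List.prefix_nil.mp hpre)

lemma foundLoop_iff (wcs : List Char) (ps : List Int) :
    foundLoop wcs ps = true ↔
      ∃ q ∈ ps, PySem.Chars.count (PySem.List.slice wcs none (some q)) ['2'] % 2 = 0 := by
  induction ps with
  | nil => simp [foundLoop]
  | cons p rest ih =>
    by_cases hc : PySem.Chars.count (PySem.List.slice wcs none (some p)) ['2'] % 2 = 0
    · simp [foundLoop, hc]
    · simp [foundLoop, hc, ih]

lemma isPoorLoop_iff (wcs : List Char) (ls : List Int) :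
    isPoorLoop wcs ls = true ↔ ∀ l ∈ ls,
      (PySem.List.slice wcs none (some l) = (PySem.List.slice wcs none (some l)).reverse →
       PySem.Chars.count (PySem.List.slice wcs none (some l)) ['2'] % 2 = 0 →
       foundLoop wcs (non_prefix_occurrences (PySem.List.slice wcs none (some l)) wcs) = true) := by
  induction ls with
  | nil => simp [isPoorLoop]
  | cons l rest ih =>
    rw [List.forall_mem_cons, ← ih]
    show (if ¬ (PySem.List.slice wcs none (some l) = (PySem.List.slice wcs none (some l)).reverse)
          then isPoorLoop wcs rest
          else if ¬ (PySem.Chars.count (PySem.List.slice wcs none (some l)) ['2'] % 2 = 0)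
          then isPoorLoop wcs rest
          else if foundLoop wcs (non_prefix_occurrences (PySem.List.slice wcs none (some l)) wcs)
          then isPoorLoop wcs rest else false) = true ↔ _
    by_cases h1 : PySem.List.slice wcs none (some l) = (PySem.List.slice wcs none (some l)).reverse
    · rw [if_neg (not_not_intro h1)]
      by_cases h2 : PySem.Chars.count (PySem.List.slice wcs none (some l)) ['2'] % 2 = 0
      · rw [if_neg (not_not_intro h2)]
        by_cases h3 : foundLoop wcs (non_prefix_occurrences (PySem.List.slice wcs none (some l)) wcs) = true
        · rw [if_pos h3]
          constructor
          · intro hr; exact ⟨fun _ _ => h3, hr⟩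
          · exact And.right
        · rw [if_neg h3]
          constructor
          · intro hff; cases hff
          · rintro ⟨hcl, _⟩; exact absurd (hcl h1 h2) h3
      · rw [if_pos h2]
        constructor
        · intro hr; exact ⟨fun _ hc2 => absurd hc2 h2, hr⟩
        · exact And.right
    · rw [if_pos h1]
      constructor
      · intro hr; exact ⟨fun hc => absurd hc h1, hr⟩
      · exact And.right

-- the inner search of A, expressed through matchAt/par2
lemma condA_iff (wcs : List Char) (ln : Nat) (hln : ln ≤ wcs.length) :
    (foundLoop wcs (non_prefix_occurrences (wcs.take ln) wcs) = true) ↔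
    ∃ p : Nat, 1 ≤ p ∧ p ≤ wcs.length ∧ matchAt wcs p ln ∧ par2 wcs p = 0 := by
  rw [foundLoop_iff]
  by_cases h0 : ln = 0
  · subst h0
    rw [non_prefix_occurrences, if_pos (by simp)]
    constructor
    · rintro ⟨q, hq, hpar⟩
      rw [PySem.List.mem_pyRange_one] at hq
      obtain ⟨h1, h2⟩ := hq
      obtain ⟨qn, rfl⟩ : ∃ qn : Nat, q = (qn : Int) := ⟨q.toNat, (Int.toNat_of_nonneg (by omega)).symm⟩
      rw [PySem.List.slice_to_natCast, count2_eq] at hpar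
      exact ⟨qn, by omega, by omega, by simp [matchAt], hpar⟩
    · rintro ⟨p, h1, h2, _, hpar⟩
      refine ⟨(p : Int), PySem.List.mem_pyRange_one.mpr ⟨by omega, by omega⟩, ?_⟩
      rw [PySem.List.slice_to_natCast, count2_eq]
      exact hpar
  · have hlen : (wcs.take ln).length = ln := by simp [List.length_take]; omega
    have hu : wcs.take ln ≠ [] := by
      intro hnil; rw [hnil] at hlen; simp at hlen; omega
    rw [non_prefix_occurrences, if_neg (by rw [hlen]; omega)]
    constructor
    · rintro ⟨q, hq, hpar⟩
      rw [occLoop_mem (wcs.take ln) wcs hu q 1 [] one_pos] at hq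
      rcases hq with hq | ⟨qn, rfl, hle, hpre⟩
      · simp at hq
      · have hmatch : matchAt wcs qn ln := by
          rw [List.prefix_iff_eq_take, hlen] at hpre
          exact hpre.symm
        have hqlen : qn < wcs.length := by
          have h1 := hpre.length_le
          rw [hlen, List.length_drop] at h1
          omega
        rw [PySem.List.slice_to_natCast, count2_eq] at hpar
        exact ⟨qn, hle, by omega, hmatch, hpar⟩
    · rintro ⟨p, h1, h2, hm, hpar⟩
      refine ⟨(p : Int), ?_, ?_⟩
      · rw [occLoop_mem (wcs.take ln) wcs hu _ 1 [] one_pos]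
        refine Or.inr ⟨p, rfl, h1, ?_⟩
        rw [List.prefix_iff_eq_take, hlen]
        exact hm.symm
      · rw [PySem.List.slice_to_natCast, count2_eq]
        exact hpar

theorem is_poor_iff (w : String) : is_poor w = true ↔ PoorSpec w.toList := by
  rw [is_poor, isPoorLoop_iff]
  constructor
  · intro h l hl hpal hpar
    have hmem : ((l : Nat) : Int) ∈ PySem.List.pyRange 0 ((w.toList.length : Int) + 1) 1 :=
      PySem.List.mem_pyRange_one.mpr ⟨by omega, by omega⟩
    have h2 := h _ hmem
    rw [PySem.List.slice_to_natCast, count2_eq] at h2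
    exact (condA_iff w.toList l hl).mp (h2 hpal hpar)
  · intro h l hlmem
    rw [PySem.List.mem_pyRange_one] at hlmem
    obtain ⟨h1, h2⟩ := hlmem
    obtain ⟨ln, rfl⟩ : ∃ ln : Nat, l = (ln : Int) := ⟨l.toNat, (Int.toNat_of_nonneg h1).symm⟩
    rw [PySem.List.slice_to_natCast, count2_eq]
    intro hpal hpar
    exact (condA_iff w.toList ln (by omega)).mpr (h ln (by omega) hpal hpar)

-- ---------- B-side ----------

def Efilter (cs : List Char) : List Int :=
  (List.range cs.length).filterMap (fun j =>
    if ((cs.take (j+1)).count '2') % 2 = 0 then some (((j+1 : Nat)) : Int) else none)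

lemma evensFold (cs : List Char) : ∀ (i0 : Nat) (p0 : Int) (acc : List Int),
    (cs.foldl (fun (st : Int × Int × List Int) c =>
      let i := st.1 + 1
      let parity := (st.2.1 + (if c = '2' then 1 else 0)) % 2
      (i, parity, if parity = 0 then st.2.2 ++ [i] else st.2.2)) ((i0 : Int), p0, acc)).2.2
    = acc ++ (List.range cs.length).filterMap (fun j =>
        if (p0 + (((cs.take (j+1)).count '2' : Nat) : Int)) % 2 = 0
        then some (((i0 + (j+1) : Nat)) : Int) else none) := by
  induction cs with
  | nil => intro i0 p0 acc; simp
  | cons c t ih =>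
    intro i0 p0 acc
    rw [List.foldl_cons]
    dsimp only
    rw [show ((i0 : Int) + 1) = ((i0 + 1 : Nat) : Int) from by push_cast; ring]
    rw [ih (i0 + 1)]
    simp only [List.length_cons, List.range_succ_eq_map, List.filterMap_cons, List.filterMap_map]
    have htake1 : ((c :: t).take (0+1)).count '2' = (if c = '2' then (1:Nat) else 0) := by
      simp [List.count_cons]
    have hhead : (p0 + (((((c :: t).take (0+1)).count '2' : Nat)) : Int)) % 2
        = (p0 + (if c = '2' then (1:Int) else 0)) % 2 := by
      rw [htake1]; congr 1
      by_cases hc : c = '2' <;> simp [hc]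
    have htail : ∀ j, j ∈ List.range t.length →
        (if ((p0 + (if c = '2' then (1:Int) else 0)) % 2
              + (((t.take (j+1)).count '2' : Nat) : Int)) % 2 = 0
         then some (((i0 + 1 + (j+1) : Nat)) : Int) else none)
        = ((fun j => if (p0 + ((((c :: t).take (j+1)).count '2' : Nat) : Int)) % 2 = 0
            then some (((i0 + (j+1) : Nat)) : Int) else none) ∘ Nat.succ) j := by
      intro j _
      simp only [Function.comp_apply]
      have hc2 : ((c :: t).take (j + 1 + 1)).count '2'
          = (t.take (j+1)).count '2' + (if c = '2' then (1:Nat) else 0) := by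
        rw [List.take_succ_cons, List.count_cons]
        by_cases hc : c = '2' <;> simp [hc]
      have hsj : Nat.succ j + 1 = j + 1 + 1 := rfl
      rw [hsj, hc2]
      have hcond : (((p0 + (if c = '2' then (1:Int) else 0)) % 2
              + (((t.take (j+1)).count '2' : Nat) : Int)) % 2 = 0)
          ↔ ((p0 + ((((t.take (j+1)).count '2' + (if c = '2' then (1:Nat) else 0) : Nat)) : Int)) % 2 = 0) := by
        by_cases hc : c = '2' <;> simp only [hc, if_true, if_false] <;> push_cast <;> omega
      have hval : (i0 + 1 + (j+1) : Nat) = (i0 + (Nat.succ j + 1) : Nat) := by omega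
      rw [hval, if_congr hcond rfl rfl]
    rw [hhead]
    by_cases hpar : (p0 + (if c = '2' then (1:Int) else 0)) % 2 = 0
    · rw [if_pos hpar, if_pos hpar]
      dsimp only
      rw [List.filterMap_congr htail]
      simp
    · rw [if_neg hpar, if_neg hpar]
      dsimp only
      rw [List.filterMap_congr htail]

lemma evensLoop_eq (cs : List Char) : evensLoop cs = Efilter cs := by
  unfold evensLoop Efilter
  have h := evensFold cs 0 0 []
  simp only [Nat.cast_zero] at h
  rw [h, List.nil_append]
  apply List.filterMap_congr
  intro j _
  have hcond : ((0 : Int) + (((cs.take (j+1)).count '2' : Nat) : Int)) % 2 = 0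
      ↔ ((cs.take (j+1)).count '2') % 2 = 0 := by omega
  have hval : (0 + (j+1) : Nat) = (j+1 : Nat) := by omega
  rw [hval, if_congr hcond rfl rfl]

lemma mem_Efilter (cs : List Char) (q : Int) :
    q ∈ Efilter cs ↔ ∃ p : Nat, q = (p : Int) ∧ 1 ≤ p ∧ p ≤ cs.length ∧ par2 cs p = 0 := by
  unfold Efilter par2
  rw [List.mem_filterMap]
  constructor
  · rintro ⟨j, hj, hsome⟩
    rw [List.mem_range] at hj
    by_cases hc : ((cs.take (j+1)).count '2') % 2 = 0
    · rw [if_pos hc] at hsome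
      exact ⟨j + 1, (Option.some_inj.mp hsome).symm, by omega, by omega, hc⟩
    · rw [if_neg hc] at hsome; cases hsome
  · rintro ⟨p, rfl, h1, h2, hpar⟩
    refine ⟨p - 1, by rw [List.mem_range]; omega, ?_⟩
    have hp1 : p - 1 + 1 = p := by omega
    rw [hp1, if_pos hpar]

lemma pairwise_Efilter (cs : List Char) : (Efilter cs).Pairwise (· < ·) := by
  unfold Efilter
  apply List.Pairwise.filterMap _ _ List.pairwise_lt_range
  intro a a' haa b hb b' hb'
  by_cases hc : ((cs.take (a+1)).count '2') % 2 = 0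
  · rw [if_pos hc] at hb
    by_cases hc' : ((cs.take (a'+1)).count '2') % 2 = 0
    · rw [if_pos hc'] at hb'
      rw [← Option.some_inj.mp hb, ← Option.some_inj.mp hb']
      exact_mod_cast by omega
    · rw [if_neg hc'] at hb'; cases hb'
  · rw [if_neg hc] at hb; cases hb

-- the second loop of B keeps the last palindromic entry; on a sorted list this
-- is the largest one
lemma maxPal_cases (cs : List Char) : ∀ (xs : List Int), xs.Pairwise (· < ·) → ∀ (m0 : Int),
    (xs.foldl (fun m l =>
        let p := PySem.List.slice cs none (some l)
        if p = p.reverse then l else m) m0 = m0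
      ∧ ∀ l ∈ xs, ¬ (PySem.List.slice cs none (some l) = (PySem.List.slice cs none (some l)).reverse)) ∨
    (∃ r ∈ xs, xs.foldl (fun m l =>
        let p := PySem.List.slice cs none (some l)
        if p = p.reverse then l else m) m0 = r
      ∧ (PySem.List.slice cs none (some r) = (PySem.List.slice cs none (some r)).reverse)
      ∧ ∀ l ∈ xs, (PySem.List.slice cs none (some l) = (PySem.List.slice cs none (some l)).reverse) → l ≤ r) := by
  intro xs
  induction xs with
  | nil => intro _ m0; left; simp
  | cons x t ih =>
    intro hpw m0
    have hpt : t.Pairwise (· < ·) := (List.pairwise_cons.mp hpw).2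
    have hxlt : ∀ l ∈ t, x < l := (List.pairwise_cons.mp hpw).1
    rw [List.foldl_cons]
    dsimp only
    by_cases hx : PySem.List.slice cs none (some x) = (PySem.List.slice cs none (some x)).reverse
    · rw [if_pos hx]
      rcases ih hpt x with ⟨heq, hnone⟩ | ⟨r, hr, heq, hPr, hmax⟩
      · right
        refine ⟨x, List.mem_cons_self, heq, hx, ?_⟩
        intro l hl hPl
        rcases List.mem_cons.mp hl with rfl | hl
        · exact le_rfl
        · exact absurd hPl (hnone l hl)
      · right
        refine ⟨r, List.mem_cons_of_mem x hr, heq, hPr, ?_⟩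
        intro l hl hPl
        rcases List.mem_cons.mp hl with rfl | hl
        · exact le_of_lt (hxlt r hr)
        · exact hmax l hl hPl
    · rw [if_neg hx]
      rcases ih hpt m0 with ⟨heq, hnone⟩ | ⟨r, hr, heq, hPr, hmax⟩
      · left
        refine ⟨heq, ?_⟩
        intro l hl
        rcases List.mem_cons.mp hl with rfl | hl
        · exact hx
        · exact hnone l hl
      · right
        refine ⟨r, List.mem_cons_of_mem x hr, heq, hPr, ?_⟩
        intro l hl hPl
        rcases List.mem_cons.mp hl with rfl | hl
        · exact absurd hPl hx
        · exact hmax l hl hPl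

theorem is_poor_alt_iff (w : String) : is_poor_alt w = true ↔ PoorSpec w.toList := by
  have hunfold : is_poor_alt w =
      (if Efilter w.toList = [] then false
       else if maxPalLoop w.toList (Efilter w.toList) = 0 then true
       else (Efilter w.toList).any (fun p =>
         PySem.List.slice w.toList (some p) (some (p + maxPalLoop w.toList (Efilter w.toList))) =
           PySem.List.slice w.toList none (some (maxPalLoop w.toList (Efilter w.toList))))) := by
    simp only [is_poor_alt, evensLoop_eq]
  rw [hunfold]
  by_cases hE : Efilter w.toList = []
  · rw [if_pos hE]
    simp only [Bool.false_eq_true, false_iff]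
    intro hps
    obtain ⟨p, h1, h2, _, h4⟩ := hps 0 (Nat.zero_le _) (by simp [isPal]) (by simp [par2])
    have hmem : ((p : Nat) : Int) ∈ Efilter w.toList := (mem_Efilter w.toList _).mpr ⟨p, rfl, h1, h2, h4⟩
    rw [hE] at hmem
    simp at hmem
  · rw [if_neg hE]
    rcases maxPal_cases w.toList (Efilter w.toList) (pairwise_Efilter w.toList) 0 with
      ⟨heq, hnone⟩ | ⟨r, hrmem, heq, hPr, hmax⟩
    · have hm0 : maxPalLoop w.toList (Efilter w.toList) = 0 := by unfold maxPalLoop; exact heq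
      rw [if_pos hm0]
      simp only [true_iff]
      intro l hl hpal hpar
      obtain ⟨q, hq⟩ := List.exists_mem_of_ne_nil _ hE
      obtain ⟨p, rfl, hp1, hp2, hp4⟩ := (mem_Efilter w.toList q).mp hq
      by_cases hl0 : l = 0
      · subst hl0; exact ⟨p, hp1, hp2, by simp [matchAt], hp4⟩
      · exfalso
        have hlE : ((l : Nat) : Int) ∈ Efilter w.toList :=
          (mem_Efilter w.toList _).mpr ⟨l, rfl, by omega, hl, hpar⟩
        apply hnone _ hlE
        rw [PySem.List.slice_to_natCast]
        exact hpal
    · obtain ⟨rn, rfl, hr1, hr2, hrpar⟩ := (mem_Efilter w.toList r).mp hrmem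
      have hmr : maxPalLoop w.toList (Efilter w.toList) = ((rn : Nat) : Int) := by
        unfold maxPalLoop; exact heq
      rw [hmr]
      rw [if_neg (by exact_mod_cast (by omega : ¬ (rn : Int) = 0))]
      rw [PySem.List.slice_to_natCast] at hPr
      rw [List.any_eq_true]
      constructor
      · rintro ⟨q, hqmem, hqB⟩
        obtain ⟨pn, rfl, hp1, hp2, hp4⟩ := (mem_Efilter w.toList q).mp hqmem
        rw [decide_eq_true_eq] at hqB
        rw [PySem.List.slice_natCast_add, PySem.List.slice_to_natCast] at hqB
        have hmatch : matchAt w.toList pn rn := hqB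
        intro l hl hpal hpar
        by_cases hl0 : l = 0
        · subst hl0; exact ⟨pn, hp1, hp2, by simp [matchAt], hp4⟩
        · have hlE : ((l : Nat) : Int) ∈ Efilter w.toList :=
            (mem_Efilter w.toList _).mpr ⟨l, rfl, by omega, hl, hpar⟩
          have hlr : ((l : Nat) : Int) ≤ ((rn : Nat) : Int) :=
            hmax _ hlE (by rw [PySem.List.slice_to_natCast]; exact hpal)
          have hlrn : l ≤ rn := by exact_mod_cast hlr
          refine ⟨pn, hp1, hp2, ?_, hp4⟩
          unfold matchAt at hmatch ⊢
          have ht1 : (w.toList.drop pn).take l = ((w.toList.drop pn).take rn).take l := by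
            rw [List.take_take]; congr 1; omega
          have ht2 : w.toList.take l = (w.toList.take rn).take l := by
            rw [List.take_take]; congr 1; omega
          rw [ht1, hmatch, ← ht2]
      · intro hps
        obtain ⟨p, hp1, hp2, hmatch, hp4⟩ := hps rn hr2 hPr hrpar
        refine ⟨(p : Int), (mem_Efilter w.toList _).mpr ⟨p, rfl, hp1, hp2, hp4⟩, ?_⟩
        rw [decide_eq_true_eq]
        rw [PySem.List.slice_natCast_add, PySem.List.slice_to_natCast]
        exact hmatch

-- ===== VERDICT (by name: the statement is the Claim_ definition above) =====
theorem is_poor_spec : Claim_equal_is_poor := by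
  intro w _
  unfold Spec_is_poor
  have h1 := is_poor_iff w
  have h2 := is_poor_alt_iff w
  cases ha : is_poor w <;> cases hb : is_poor_alt w <;> simp_all
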